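-- pv_equiv track=rewrite | github.com/gofarrrr/lolla2 | src/engine/engines/selection/query_classifier.py | _find_matched_triggers
-- ===== SOURCE A (Python) =====
-- from typing import Dict, List, Optional, Any
--
-- def _find_matched_triggers(keywords: List[str]) -> List[str]:
--     """
--     Find domain triggers that match keywords.
--     Basic implementation for domain identification.
--     """
--     domain_triggers = {
--         "business_strategy": [
--             "strategy",
--             "business",
--             "market",
--             "competitive",
--             "planning",
--         ],
--         "technology": ["technology", "software", "system", "technical", "digital"],
--         "finance": ["financial", "budget", "cost", "revenue", "investment", "roi"],
--         "operations": [
--             "operations",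
--             "process",
--             "workflow",
--             "efficiency",
--             "optimization",
--         ],
--         "marketing": ["marketing", "brand", "customer", "campaign", "audience"],
--         "leadership": [
--             "leadership",
--             "management",
--             "team",
--             "culture",
--             "organization",
--         ],
--         "innovation": ["innovation", "creative", "design", "prototype", "research"],
--         "risk_management": [
--             "risk",
--             "compliance",
--             "security",
--             "governance",
--             "audit",
--         ],
--     }
--
--     matched = []
--     for domain, triggers in domain_triggers.items():
--         if any(trigger in keywords for trigger in triggers):
--             matched.append(domain)
--
--     return matched
-- ===== SOURCE B (Python) =====
-- from typing import Dict, List, Optional, Any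
--
-- def _find_matched_triggers(keywords: List[str]) -> List[str]:
--     """
--     Find domain triggers that match keywords.
--     Inverted-index implementation: a flat trigger-word -> domain table,
--     one pass over keywords, then the matched domains in canonical order.
--     """
--     trigger_domain = {
--         "strategy": "business_strategy",
--         "business": "business_strategy",
--         "market": "business_strategy",
--         "competitive": "business_strategy",
--         "planning": "business_strategy",
--         "technology": "technology",
--         "software": "technology",
--         "system": "technology",
--         "technical": "technology",
--         "digital": "technology",
--         "financial": "finance",
--         "budget": "finance",
--         "cost": "finance",
--         "revenue": "finance",
--         "investment": "finance",
--         "roi": "finance",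
--         "operations": "operations",
--         "process": "operations",
--         "workflow": "operations",
--         "efficiency": "operations",
--         "optimization": "operations",
--         "marketing": "marketing",
--         "brand": "marketing",
--         "customer": "marketing",
--         "campaign": "marketing",
--         "audience": "marketing",
--         "leadership": "leadership",
--         "management": "leadership",
--         "team": "leadership",
--         "culture": "leadership",
--         "organization": "leadership",
--         "innovation": "innovation",
--         "creative": "innovation",
--         "design": "innovation",
--         "prototype": "innovation",
--         "research": "innovation",
--         "risk": "risk_management",
--         "compliance": "risk_management",
--         "security": "risk_management",
--         "governance": "risk_management",
--         "audit": "risk_management",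
--     }
--     domain_order = [
--         "business_strategy", "technology", "finance", "operations",
--         "marketing", "leadership", "innovation", "risk_management",
--     ]
--
--     matched = set()
--     for keyword in keywords:
--         domain = trigger_domain.get(keyword)
--         if domain is not None:
--             matched.add(domain)
--
--     return [domain for domain in domain_order if domain in matched]
-- ===== Notes on version B (the rewrite author's own statement) =====
-- stated objective: faster
-- what changed: Replaces the domains-by-triggers double scan over keywords with a flat trigger-word-to-domain lookup table, a single pass over keywords collecting matched domains into a set, and an order-restoring scan over the fixed domain order.
import Mathlib
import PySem

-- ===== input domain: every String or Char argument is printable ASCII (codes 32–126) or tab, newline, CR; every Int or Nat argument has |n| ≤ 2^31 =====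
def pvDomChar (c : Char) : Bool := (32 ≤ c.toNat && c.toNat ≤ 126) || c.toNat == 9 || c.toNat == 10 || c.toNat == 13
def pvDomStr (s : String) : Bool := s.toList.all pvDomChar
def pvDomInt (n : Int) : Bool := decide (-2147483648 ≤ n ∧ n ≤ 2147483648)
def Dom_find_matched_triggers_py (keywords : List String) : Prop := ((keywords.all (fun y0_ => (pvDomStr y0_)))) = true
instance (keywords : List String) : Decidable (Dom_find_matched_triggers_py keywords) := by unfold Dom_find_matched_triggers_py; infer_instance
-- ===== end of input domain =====

-- B replaces A's domains×triggers double scan with a flat trigger→domain lookup table,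
-- one pass over keywords and an order-restoring scan over the fixed domain order (objective: faster).

-- ===== PORT A =====
-- A's literal dict of domain triggers (insertion order)
def domainTriggersA : PySem.Dict String (List String) := PySem.Dict.mk [
  ("business_strategy", ["strategy", "business", "market", "competitive", "planning"]),
  ("technology", ["technology", "software", "system", "technical", "digital"]),
  ("finance", ["financial", "budget", "cost", "revenue", "investment", "roi"]),
  ("operations", ["operations", "process", "workflow", "efficiency", "optimization"]),
  ("marketing", ["marketing", "brand", "customer", "campaign", "audience"]),
  ("leadership", ["leadership", "management", "team", "culture", "organization"]),
  ("innovation", ["innovation", "creative", "design", "prototype", "research"]),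
  ("risk_management", ["risk", "compliance", "security", "governance", "audit"])]

def find_matched_triggers_py (keywords : List String) : List String :=
  -- for domain, triggers in domain_triggers.items(): if any(trigger in keywords …): matched.append(domain)
  domainTriggersA.items.foldl
    (fun matched dt =>
      if dt.2.any (fun trigger => keywords.contains trigger) then matched ++ [dt.1] else matched)
    []

-- ===== PORT B =====
-- B's flat trigger-word → domain table (a dict literal in Source B)
def triggerDomainB : PySem.Dict String String := PySem.Dict.mk [
  ("strategy", "business_strategy"), ("business", "business_strategy"),
  ("market", "business_strategy"), ("competitive", "business_strategy"),
  ("planning", "business_strategy"),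
  ("technology", "technology"), ("software", "technology"), ("system", "technology"),
  ("technical", "technology"), ("digital", "technology"),
  ("financial", "finance"), ("budget", "finance"), ("cost", "finance"),
  ("revenue", "finance"), ("investment", "finance"), ("roi", "finance"),
  ("operations", "operations"), ("process", "operations"), ("workflow", "operations"),
  ("efficiency", "operations"), ("optimization", "operations"),
  ("marketing", "marketing"), ("brand", "marketing"), ("customer", "marketing"),
  ("campaign", "marketing"), ("audience", "marketing"),
  ("leadership", "leadership"), ("management", "leadership"), ("team", "leadership"),
  ("culture", "leadership"), ("organization", "leadership"),
  ("innovation", "innovation"), ("creative", "innovation"), ("design", "innovation"),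
  ("prototype", "innovation"), ("research", "innovation"),
  ("risk", "risk_management"), ("compliance", "risk_management"),
  ("security", "risk_management"), ("governance", "risk_management"),
  ("audit", "risk_management")]

-- B's canonical domain output order
def domainOrderB : List String :=
  ["business_strategy", "technology", "finance", "operations",
   "marketing", "leadership", "innovation", "risk_management"]

def find_matched_triggers_py_alt (keywords : List String) : List String :=
  -- matched = set();  for keyword in keywords: d = trigger_domain.get(keyword); if d is not None: matched.add(d)
  let matched : PySem.Set String :=
    keywords.foldl
      (fun matched keyword =>
        match triggerDomainB.get? keyword with
        | some domain => PySem.Set.add matched domain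
        | none => matched)
      PySem.Set.empty
  -- [domain for domain in domain_order if domain in matched]
  domainOrderB.filter (fun domain => PySem.Set.contains matched domain)

-- ===== PRECONDITION & SPEC =====
def Spec_find_matched_triggers_py (keywords : List String) (out : List String) : Prop := out = find_matched_triggers_py_alt keywords
instance (keywords : List String) (out : List String) : Decidable (Spec_find_matched_triggers_py keywords out) := by unfold Spec_find_matched_triggers_py; infer_instance

-- ===== CLAIM (what is proved, stated in full; the proofs are below) =====
def Claim_equal_find_matched_triggers_py : Prop := ∀ (keywords : List String), Dom_find_matched_triggers_py keywords → Spec_find_matched_triggers_py keywords (find_matched_triggers_py keywords)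

-- ===== LEMMAS AND PROOFS =====

-- the flat table's keys are distinct (each trigger word belongs to one domain)
theorem nodup_keys_triggerDomainB : triggerDomainB.keys.Nodup := by decide

set_option maxHeartbeats 1000000 in
-- lookup in the flat table finds exactly the owning domain's trigger words
theorem get?_triggerDomainB (dt : String × List String) (hdt : dt ∈ domainTriggersA.items)
    (kw : String) : triggerDomainB.get? kw = some dt.1 ↔ kw ∈ dt.2 := by
  rw [PySem.Dict.get?_eq_some_iff_mem_items triggerDomainB kw dt.1 nodup_keys_triggerDomainB]
  fin_cases hdt <;> simp [triggerDomainB, Prod.ext_iff, eq_comm]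

-- membership in the matched set built by B's single pass over keywords
theorem mem_collect (kws : List String) (s : PySem.Set String) (y : String) :
    y ∈ kws.foldl
      (fun matched keyword =>
        match triggerDomainB.get? keyword with
        | some domain => PySem.Set.add matched domain
        | none => matched) s ↔
    y ∈ s ∨ ∃ kw ∈ kws, triggerDomainB.get? kw = some y := by
  induction kws generalizing s with
  | nil => simp
  | cons k t ih =>
    simp only [List.foldl_cons]
    cases h : triggerDomainB.get? k with
    | none => simp [h, ih]
    | some d =>
      simp only [ih, PySem.Set.mem_add, List.mem_cons]
      constructor
      · rintro ((hs | rfl) | ⟨kw, hkw, hg⟩)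
        · exact Or.inl hs
        · exact Or.inr ⟨k, Or.inl rfl, h⟩
        · exact Or.inr ⟨kw, Or.inr hkw, hg⟩
      · rintro (hs | ⟨kw, (rfl | hkw), hg⟩)
        · exact Or.inl (Or.inl hs)
        · rw [h] at hg; exact Or.inl (Or.inr (Option.some_injective _ hg).symm)
        · exact Or.inr ⟨kw, hkw, hg⟩

-- ===== VERDICT (by name: the statement is the Claim_ definition above) =====
theorem find_matched_triggers_py_spec : Claim_equal_find_matched_triggers_py := by
  intro keywords _
  unfold Spec_find_matched_triggers_py find_matched_triggers_py find_matched_triggers_py_alt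
  rw [PySem.List.foldl_append_if
    (p := fun dt : String × List String => dt.2.any (fun trigger => keywords.contains trigger))
    (f := Prod.fst)]
  show (domainTriggersA.items.filter _).map Prod.fst = _
  have horder : domainOrderB = domainTriggersA.items.map Prod.fst := by decide
  rw [horder, List.filter_map]
  refine congrArg (List.map Prod.fst) (List.filter_congr ?_)
  intro dt hdt
  rw [Bool.eq_iff_iff]
  simp only [Function.comp, List.any_eq_true, List.contains_iff_mem,
    PySem.Set.contains_iff, mem_collect]
  constructor
  · rintro ⟨t, ht, hk⟩
    exact Or.inr ⟨t, hk, (get?_triggerDomainB dt hdt t).mpr ht⟩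
  · rintro (h | ⟨kw, hkw, hg⟩)
    · simp [PySem.Set.empty] at h
    · exact ⟨kw, (get?_triggerDomainB dt hdt kw).mp hg, hkw⟩
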